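-- pv_equiv track=rewrite | github.com/brayanestive18/script_varios | convert_mysql_to_postgres.py | fix_enum_tuples_in_line
-- ===== SOURCE A (Python) =====
-- def split_sql_values(s):
--     """Split comma-separated SQL values, respecting quoted strings."""
--     values = []
--     current = []
--     in_string = False
--     string_char = None
--     i = 0
--
--     while i < len(s):
--         ch = s[i]
--         if in_string:
--             current.append(ch)
--             if ch == '\\':
--                 if i + 1 < len(s):
--                     i += 1
--                     current.append(s[i])
--             elif ch == string_char:
--                 if i + 1 < len(s) and s[i + 1] == string_char:
--                     i += 1
--                     current.append(s[i])
--                 else: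
--                     in_string = False
--         elif ch in ("'", '"'):
--             in_string = True
--             string_char = ch
--             current.append(ch)
--         elif ch == ',':
--             values.append(''.join(current))
--             current = []
--         else:
--             current.append(ch)
--         i += 1
--
--     if current:
--         values.append(''.join(current))
--     return values
--
-- def find_closing_paren(s, start):
--     """Find the closing ) matching the ( at position start, respecting strings."""
--     depth = 0
--     in_string = False
--     string_char = None
--     i = start
--
--     while i < len(s):
--         ch = s[i]
--         if in_string:
--             if ch == '\\':
--                 i += 1
--             elif ch == string_char:
--                 if i + 1 < len(s) and s[i + 1] == string_char:
--                     i += 1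
--                 else:
--                     in_string = False
--         elif ch in ("'", '"'):
--             in_string = True
--             string_char = ch
--         elif ch == '(':
--             depth += 1
--         elif ch == ')':
--             depth -= 1
--             if depth == 0:
--                 return i
--         i += 1
--     return -1
--
-- def fix_enum_tuples_in_line(line, enum_indices):
--     """Fix value tuples in a line, converting empty strings to NULL at enum positions."""
--     result = []
--     i = 0
--
--     while i < len(line):
--         paren_start = line.find('(', i)
--         if paren_start == -1:
--             result.append(line[i:])
--             break
--
--         result.append(line[i:paren_start])
--         paren_end = find_closing_paren(line, paren_start)
--         if paren_end == -1:
--             result.append(line[paren_start:])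
--             break
--
--         inner = line[paren_start + 1:paren_end]
--         values = split_sql_values(inner)
--
--         for j in enum_indices:
--             if j < len(values):
--                 val = values[j].strip()
--                 if val == "''" or val == '""':
--                     values[j] = ' NULL'
--
--         result.append('(')
--         result.append(','.join(values))
--         result.append(')')
--         i = paren_end + 1
--
--     return ''.join(result)
-- ===== SOURCE B (Python) =====
-- def fix_enum_tuples_in_line(line, enum_indices):
--     """Fix value tuples in a line, converting empty strings to NULL at enum positions.
--
--     Single forward pass: one state machine tracks paren depth, quoted-string state
--     and the current tuple's values, instead of re-scanning with helper functions.
--     """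
--     out = []
--     values = []      # completed values of the current tuple
--     buf = []         # characters of the value being collected
--     raw = []         # raw characters of the current tuple (verbatim fallback)
--     depth = 0
--     in_string = False
--     quote = None
--     i = 0
--     n = len(line)
--     while i < n:
--         ch = line[i]
--         if depth == 0:
--             if ch == '(':
--                 depth = 1
--                 in_string = False
--                 quote = None
--                 values = []
--                 buf = []
--                 raw = ['(']
--             else:
--                 out.append(ch)
--             i += 1
--             continue
--         raw.append(ch)
--         if in_string:
--             buf.append(ch)
--             if ch == '\\':
--                 if i + 1 < n:
--                     i += 1
--                     buf.append(line[i])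
--                     raw.append(line[i])
--             elif ch == quote:
--                 if i + 1 < n and line[i + 1] == quote:
--                     i += 1
--                     buf.append(line[i])
--                     raw.append(line[i])
--                 else:
--                     in_string = False
--         elif ch in ("'", '"'):
--             in_string = True
--             quote = ch
--             buf.append(ch)
--         elif ch == '(':
--             depth += 1
--             buf.append(ch)
--         elif ch == ')':
--             depth -= 1
--             if depth == 0:
--                 vals = values
--                 if buf:
--                     vals.append(''.join(buf))
--                 for j in enum_indices:
--                     if 0 <= j < len(vals):
--                         val = vals[j].strip()
--                         if val == "''" or val == '""':
--                             vals[j] = ' NULL'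
--                 out.append('(' + ','.join(vals) + ')')
--                 values = []
--                 buf = []
--                 raw = []
--             else:
--                 buf.append(ch)
--         elif ch == ',':
--             values.append(''.join(buf))
--             buf = []
--         else:
--             buf.append(ch)
--         i += 1
--     if depth != 0:
--         out.append(''.join(raw))
--     return ''.join(out)
-- ===== Notes on version B (the rewrite author's own statement) =====
-- stated objective: alternative
-- what changed: Replaces A's outer find-loop with its two rescanning helpers (find_closing_paren, then split_sql_values over the same span) by a single forward state machine that tracks paren depth, quoted-string state and the current tuple's values in one pass; B's fix-up loop also skips negative enum indices, which Pre_ excludes.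
-- outside the precondition, e.g. on fix_enum_tuples_in_line("('')", [-1]): A returns '( NULL)', B returns "('')"; on fix_enum_tuples_in_line('(a)', [-5]): A raises IndexError, B returns '(a)'
import Mathlib
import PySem

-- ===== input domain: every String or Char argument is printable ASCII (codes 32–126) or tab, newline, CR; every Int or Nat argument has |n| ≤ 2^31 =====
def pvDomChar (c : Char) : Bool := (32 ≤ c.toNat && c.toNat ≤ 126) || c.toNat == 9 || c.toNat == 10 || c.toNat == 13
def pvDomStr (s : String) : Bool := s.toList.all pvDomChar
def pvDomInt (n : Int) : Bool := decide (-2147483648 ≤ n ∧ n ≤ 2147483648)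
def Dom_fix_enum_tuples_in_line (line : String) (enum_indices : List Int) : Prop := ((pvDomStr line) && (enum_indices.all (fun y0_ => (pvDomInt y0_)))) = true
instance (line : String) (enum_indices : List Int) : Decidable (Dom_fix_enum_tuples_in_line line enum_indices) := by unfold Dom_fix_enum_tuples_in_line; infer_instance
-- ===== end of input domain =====

-- B replaces A's three nested scanners (find '(', find_closing_paren, split_sql_values) by one
-- forward state machine over the line; same return value (objective: alternative decomposition).

-- ===== PORT A =====

-- ' NULL' literal
def nullChars : List Char := [' ', 'N', 'U', 'L', 'L']

-- port of find_closing_paren(s, start), rendered on the suffix s[start:]: instead of returning the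
-- index i of the matching ')', it returns (the chars strictly before that ')', the chars after it);
-- none = Python's -1.  Branches and state are exactly the Python's (depth, in_string, string_char;
-- string_char=None rendered as `default`, never compared while in_string is false).
def fcpGo : List Char → Int → Bool → Char → Option (List Char × List Char)
  | [], _, _, _ => none
  | ch :: rest, d, inS, sc =>
    if inS then
      if ch = '\\' then
        match rest with
        | c2 :: r2 => (fcpGo r2 d inS sc).map (fun p => (ch :: c2 :: p.1, p.2))
        | [] => none                    -- i jumps past the end: loop exits, return -1
      else if ch = sc then
        match rest with
        | c2 :: r2 =>
          if c2 = sc then (fcpGo r2 d inS sc).map (fun p => (ch :: c2 :: p.1, p.2))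
          else (fcpGo (c2 :: r2) d false sc).map (fun p => (ch :: p.1, p.2))
        | [] => none                    -- in_string=False, then the loop exits: -1
      else (fcpGo rest d inS sc).map (fun p => (ch :: p.1, p.2))
    else if ch = '\'' ∨ ch = '"' then (fcpGo rest d true ch).map (fun p => (ch :: p.1, p.2))
    else if ch = '(' then (fcpGo rest (d + 1) inS sc).map (fun p => (ch :: p.1, p.2))
    else if ch = ')' then
      if d = 1 then some ([], rest)     -- depth -= 1; depth == 0: found
      else (fcpGo rest (d - 1) inS sc).map (fun p => (ch :: p.1, p.2))
    else (fcpGo rest d inS sc).map (fun p => (ch :: p.1, p.2))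
  termination_by structural cs _ _ _ => cs

-- port of split_sql_values' while loop (current/values accumulators, same branch order)
def splitGo : List Char → Bool → Char → List Char → List (List Char) → List (List Char)
  | [], _, _, cur, vals => if cur ≠ [] then vals ++ [cur] else vals
  | ch :: rest, inS, sc, cur, vals =>
    if inS then
      let cur := cur ++ [ch]
      if ch = '\\' then
        match rest with
        | c2 :: r2 => splitGo r2 inS sc (cur ++ [c2]) vals
        | [] => if cur ≠ [] then vals ++ [cur] else vals   -- loop ends; trailing current flushed
      else if ch = sc then
        match rest with
        | c2 :: r2 =>
          if c2 = sc then splitGo r2 inS sc (cur ++ [c2]) vals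
          else splitGo (c2 :: r2) false sc cur vals
        | [] => if cur ≠ [] then vals ++ [cur] else vals   -- loop ends; trailing current flushed
      else splitGo rest inS sc cur vals
    else if ch = '\'' ∨ ch = '"' then splitGo rest true ch (cur ++ [ch]) vals
    else if ch = ',' then splitGo rest inS sc [] (vals ++ [cur])
    else splitGo rest inS sc (cur ++ [ch]) vals
  termination_by structural cs _ _ _ _ => cs

-- port of A's 'for j in enum_indices' fix-up loop (values[j] read/write via pyGet?/pySetD;
-- pyGet? = none is Python's IndexError, excluded by Pre_, where the fold leaves vs unchanged)
def substEnumA (ei : List Int) (vs0 : List (List Char)) : List (List Char) :=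
  ei.foldl (fun vs j =>
    if j < (vs.length : Int) then
      match PySem.List.pyGet? vs j with
      | some v =>
        if PySem.Chars.strip v = ['\'', '\''] ∨ PySem.Chars.strip v = ['"', '"'] then
          PySem.List.pySetD vs j nullChars
        else vs
      | none => vs
    else vs) vs0

-- length of the suffix after the matching ')' (used by outerA's termination)
theorem fcp_after_len : ∀ (n : Nat) (cs : List Char), cs.length ≤ n → ∀ d inS sc c a,
    fcpGo cs d inS sc = some (c, a) → a.length < cs.length := by
  intro n
  induction n with
  | zero =>
    intro cs hcs d inS sc c a h
    cases cs with
    | nil => simp [fcpGo] at h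
    | cons ch rest => simp at hcs
  | succ n ih =>
    intro cs hcs d inS sc c a h
    cases cs with
    | nil => simp [fcpGo] at h
    | cons ch rest =>
      cases rest with
      | nil =>
        simp only [fcpGo] at h
        split_ifs at h <;>
          first
          | (obtain ⟨⟨pc, pa⟩, hp, hpe⟩ := Option.map_eq_some_iff.mp h
             have h2 : pa = a := congrArg Prod.snd hpe
             have hl := ih _ (by simp at hcs ⊢; omega) _ _ _ _ _ hp
             subst h2
             simp at hl ⊢
             omega)
          | simp_all [fcpGo]
      | cons c2 r2 =>
        simp only [fcpGo] at h
        split_ifs at h <;>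
          first
          | (obtain ⟨⟨pc, pa⟩, hp, hpe⟩ := Option.map_eq_some_iff.mp h
             have h2 : pa = a := congrArg Prod.snd hpe
             have hl := ih _ (by simp at hcs ⊢; omega) _ _ _ _ _ hp
             subst h2
             simp at hl ⊢
             omega)
          | simp_all [fcpGo]

-- port of fix_enum_tuples_in_line's outer while loop: position i rendered as the remaining suffix;
-- line.find('(', i) as takeWhile/dropWhile, the slices line[i:paren_start], line[paren_start+1:paren_end],
-- line[paren_end+1:] recovered from fcpGo's split
def outerA (ei : List Int) (s : List Char) : List Char :=
  if (s.dropWhile (fun c => c != '(')).isEmpty then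
    s.takeWhile (fun c => c != '(')                    -- find == -1: append line[i:], break
  else
    match hf : fcpGo (s.dropWhile (fun c => c != '(')) 0 false default with
    | none =>                                          -- unmatched: append line[paren_start:], break
      s.takeWhile (fun c => c != '(') ++ s.dropWhile (fun c => c != '(')
    | some (consumed, after) =>
      s.takeWhile (fun c => c != '(') ++ ('(' :: PySem.Chars.join [',']
        (substEnumA ei (splitGo (consumed.drop 1) false default [] []))) ++ ')' :: outerA ei after
termination_by s.length
decreasing_by
  exact lt_of_lt_of_le (fcp_after_len _ _ le_rfl _ _ _ _ _ hf) (List.length_dropWhile_le _ _)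

def fix_enum_tuples_in_line (line : String) (enum_indices : List Int) : String :=
  String.ofList (outerA enum_indices line.toList)

-- ===== PORT B =====

-- port of B's enum fix-up loop ('if 0 <= j < len(vals)')
def substEnumB (ei : List Int) (vs0 : List (List Char)) : List (List Char) :=
  ei.foldl (fun vs j =>
    if 0 ≤ j ∧ j < (vs.length : Int) then
      if PySem.Chars.strip (PySem.List.pyGetD vs j []) = ['\'', '\''] ∨
         PySem.Chars.strip (PySem.List.pyGetD vs j []) = ['"', '"'] then
        PySem.List.pySetD vs j nullChars
      else vs
    else vs) vs0

-- port of B's single-pass state machine: depth, in_string (quote=None rendered as `default`),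
-- current value buf, completed values, raw chars of the current tuple; output produced return-style
def goB (ei : List Int) : List Char → Int → Bool → Char → List Char → List (List Char) → List Char → List Char
  | [], d, _, _, _, _, raw => if d ≠ 0 then raw else []
  | ch :: rest, d, inS, qc, buf, vals, raw =>
    if d = 0 then
      if ch = '(' then goB ei rest 1 false default [] [] ['(']
      else ch :: goB ei rest 0 inS qc buf vals raw
    else
      let raw := raw ++ [ch]
      if inS then
        let buf := buf ++ [ch]
        if ch = '\\' then
          match rest with
          | c2 :: r2 => goB ei r2 d inS qc (buf ++ [c2]) vals (raw ++ [c2])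
          | [] => if d ≠ 0 then raw else []   -- loop ends past the last char
        else if ch = qc then
          match rest with
          | c2 :: r2 =>
            if c2 = qc then goB ei r2 d inS qc (buf ++ [c2]) vals (raw ++ [c2])
            else goB ei (c2 :: r2) d false qc buf vals raw
          | [] => if d ≠ 0 then raw else []   -- loop ends past the last char
        else goB ei rest d inS qc buf vals raw
      else if ch = '\'' ∨ ch = '"' then goB ei rest d true ch (buf ++ [ch]) vals raw
      else if ch = '(' then goB ei rest (d + 1) inS qc (buf ++ [ch]) vals raw
      else if ch = ')' then
        if d = 1 then                    -- depth -= 1; depth == 0: emit the fixed tuple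
          ('(' :: PySem.Chars.join [',']
            (substEnumB ei (if buf ≠ [] then vals ++ [buf] else vals))) ++ ')' ::
            goB ei rest 0 inS qc [] [] []
        else goB ei rest (d - 1) inS qc (buf ++ [ch]) vals raw
      else if ch = ',' then goB ei rest d inS qc [] (vals ++ [buf]) raw
      else goB ei rest d inS qc (buf ++ [ch]) vals raw
  termination_by structural cs _ _ _ _ _ _ => cs

def fix_enum_tuples_in_line_alt (line : String) (enum_indices : List Int) : String :=
  String.ofList (goB enum_indices line.toList 0 false default [] [] [])

-- ===== PRECONDITION & SPEC =====
-- Pre_ excludes negative enum indices: there A can raise IndexError (a negative index reaching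
-- before the tuple's start), and whether it raises depends on the tuple parsed at run time, so the
-- whole negative region is excluded; on in-range negatives A returns a value produced by Python's
-- accidental index wraparound, which B (ignoring negative column positions) does not match.
def Pre_fix_enum_tuples_in_line (line : String) (enum_indices : List Int) : Prop :=
  ∀ j ∈ enum_indices, 0 ≤ j
instance (line : String) (enum_indices : List Int) : Decidable (Pre_fix_enum_tuples_in_line line enum_indices) := by unfold Pre_fix_enum_tuples_in_line; infer_instance

def pvWitness_fix_enum_tuples_in_line : String × List Int := ("VALUES ('',2),(3,'');", [0])

def Spec_fix_enum_tuples_in_line (line : String) (enum_indices : List Int) (out : String) : Prop := out = fix_enum_tuples_in_line_alt line enum_indices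
instance (line : String) (enum_indices : List Int) (out : String) : Decidable (Spec_fix_enum_tuples_in_line line enum_indices out) := by unfold Spec_fix_enum_tuples_in_line; infer_instance

-- ===== CLAIM (what is proved, stated in full; the proofs are below) =====
def Claim_equal_fix_enum_tuples_in_line : Prop := ∀ (line : String) (enum_indices : List Int), Dom_fix_enum_tuples_in_line line enum_indices → Pre_fix_enum_tuples_in_line line enum_indices → Spec_fix_enum_tuples_in_line line enum_indices (fix_enum_tuples_in_line line enum_indices)

-- ===== LEMMAS AND PROOFS =====

-- the two fix-up loops agree on nonnegative indices
theorem substEnum_eq (ei : List Int) (h : ∀ j ∈ ei, 0 ≤ j) (vs0 : List (List Char)) :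
    substEnumA ei vs0 = substEnumB ei vs0 := by
  unfold substEnumA substEnumB
  refine PySem.List.foldl_congr_mem ei _ _ vs0 (fun vs j hj => ?_)
  have h0 : 0 ≤ j := h j hj
  by_cases hlt : j < (vs.length : Int)
  · have hget : PySem.List.pyGetD vs j [] = vs[j.toNat]'(by omega) := by
      rw [PySem.List.pyGetD_of_nonneg vs [] h0]
      exact List.getD_eq_getElem vs [] (by omega)
    rw [if_pos hlt, if_pos (⟨h0, hlt⟩ : 0 ≤ j ∧ j < (vs.length : Int)),
      PySem.List.pyGet?_eq_some_getElem vs h0 hlt, hget]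
  · simp [hlt, h0]

-- at depth 0 the machine reads none of the tuple state
theorem goB_zero_irrel (ei : List Int) : ∀ (cs : List Char) inS qc buf vals raw inS' qc' buf' vals' raw',
    goB ei cs 0 inS qc buf vals raw = goB ei cs 0 inS' qc' buf' vals' raw' := by
  intro cs
  induction cs with
  | nil => intros; simp [goB]
  | cons ch rest ih =>
    intros
    by_cases hch : ch = '('
    · conv_lhs => rw [goB]
      conv_rhs => rw [goB]
      simp [hch]
    · conv_lhs => rw [goB]
      conv_rhs => rw [goB]
      simp only [if_pos rfl, if_neg hch]
      exact congrArg _ (ih ..)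

-- copy phase: text before the next '(' passes through verbatim
theorem goB_copy (ei : List Int) : ∀ (pre rest : List Char), (∀ c ∈ pre, c ≠ '(') →
    ∀ inS qc buf vals raw,
    goB ei (pre ++ rest) 0 inS qc buf vals raw = pre ++ goB ei rest 0 inS qc buf vals raw := by
  intro pre rest hpre
  induction pre with
  | nil => intros; simp
  | cons c pre ih =>
    intro inS qc buf vals raw
    have hc : c ≠ '(' := hpre c (by simp)
    rw [List.cons_append]
    conv_lhs => rw [goB]
    simp only [if_pos rfl, if_neg hc]
    exact congrArg _ (ih (fun x hx => hpre x (by simp [hx])) ..)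

-- a nonempty scan's consumed prefix is empty or starts with the scanned head
theorem fcp_consumed_shape (x : Char) (xs : List Char) (d : Int) (inS : Bool) (sc : Char)
    (c a : List Char) (h : fcpGo (x :: xs) d inS sc = some (c, a)) :
    c = [] ∨ ∃ c', c = x :: c' := by
  cases xs with
  | nil =>
    simp only [fcpGo] at h
    split_ifs at h <;> (try simp [fcpGo] at h) <;>
      first
      | exact Or.inl h.1
      | (obtain ⟨a1, hp, hc⟩ := h; exact Or.inr ⟨_, hc.symm⟩)
  | cons c2 r2 =>
    simp only [fcpGo] at h
    split_ifs at h <;> (try simp [fcpGo] at h) <;>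
      first
      | exact Or.inl h.1
      | (obtain ⟨a1, hp, hc⟩ := h; exact Or.inr ⟨_, hc.symm⟩)

-- tuple phase: inside a tuple the machine computes exactly find_closing_paren + split_sql_values
theorem goB_tuple (ei : List Int) : ∀ (n : Nat) (cs : List Char), cs.length ≤ n →
    ∀ (d : Int) inS qc buf vals raw, 1 ≤ d →
    goB ei cs d inS qc buf vals raw =
      match fcpGo cs d inS qc with
      | none => raw ++ cs
      | some (c, after) =>
        ('(' :: PySem.Chars.join [','] (substEnumB ei (splitGo c inS qc buf vals))) ++ ')' ::
          goB ei after 0 false default [] [] [] := by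
  intro n
  induction n with
  | zero =>
    intro cs hcs d inS qc buf vals raw hd
    have hd0 : ¬ d = 0 := by omega
    cases cs with
    | nil => simp [goB, fcpGo, hd0]
    | cons ch rest => simp at hcs
  | succ n ih =>
    intro cs hcs d inS qc buf vals raw hd
    have hd0 : ¬ d = 0 := by omega
    cases cs with
    | nil => simp [goB, fcpGo, hd0]
    | cons ch rest =>
      conv_lhs => rw [goB]
      conv_rhs => rw [fcpGo.eq_def]
      by_cases hin : inS = true
      · subst hin
        by_cases hbs : ch = '\\'
        · subst hbs
          cases rest with
          | nil => simp [goB, fcpGo, hd0]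
          | cons c2 r2 =>
            simp only [hd0, if_false, reduceIte, List.cons.injEq]
            simp
            rw [ih _ (by simp at hcs; omega) _ _ _ _ _ _ hd]
            cases hf : fcpGo r2 d true qc with
            | none => simp [hf]
            | some p =>
              obtain ⟨c, after⟩ := p
              simp [hf, splitGo]
        · by_cases hqc : ch = qc
          · subst hqc
            cases rest with
            | nil => simp [goB, fcpGo, hd0, hbs]
            | cons c2 r2 =>
              by_cases hc2 : c2 = ch
              · simp [hd0, hbs, hc2]
                rw [ih _ (by simp at hcs; omega) _ _ _ _ _ _ hd]
                cases hf : fcpGo r2 d true ch with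
                | none => simp [hf]
                | some p =>
                  obtain ⟨c, after⟩ := p
                  simp [hf, splitGo, hbs]
              · simp [hd0, hbs, hc2]
                rw [ih _ (by simp at hcs ⊢; omega) _ _ _ _ _ _ hd]
                cases hf : fcpGo (c2 :: r2) d false ch with
                | none => simp [hf, hc2]
                | some p =>
                  obtain ⟨c, after⟩ := p
                  have hshape := fcp_consumed_shape c2 r2 d false ch c after hf
                  have hsg : splitGo (ch :: c) true ch buf vals
                      = splitGo c false ch (buf ++ [ch]) vals := by
                    rcases hshape with rfl | ⟨c', rfl⟩
                    · simp [splitGo, hbs]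
                    · simp [splitGo, hbs, hc2]
                  simp [hf, hsg]
          · simp [hd0, hbs, hqc]
            rw [ih _ (by simp at hcs; omega) _ _ _ _ _ _ hd]
            cases hf : fcpGo rest d true qc with
            | none => simp [hf]
            | some p =>
              obtain ⟨c, after⟩ := p
              simp [hf, splitGo, hbs, hqc]
      · have hin' : inS = false := by cases inS <;> simp_all
        subst hin'
        by_cases hq : ch = '\'' ∨ ch = '"'
        · simp [hd0, hq]
          rw [ih _ (by simp at hcs; omega) _ _ _ _ _ _ hd]
          cases hf : fcpGo rest d true ch with
          | none => simp [hf]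
          | some p =>
            obtain ⟨c, after⟩ := p
            simp [hf, splitGo, hq]
        · by_cases hop : ch = '('
          · subst hop
            simp [hd0, hq]
            rw [ih _ (by simp at hcs; omega) _ _ _ _ _ _ (by omega : (1:Int) ≤ d + 1)]
            cases hf : fcpGo rest (d + 1) false qc with
            | none => simp [hf]
            | some p =>
              obtain ⟨c, after⟩ := p
              simp [hf, splitGo]
          · by_cases hcl : ch = ')'
            · subst hcl
              by_cases hd1 : d = 1
              · subst hd1
                rw [goB_zero_irrel ei rest false qc [] [] [] false default [] [] []]
                simp [splitGo]
              · simp [hd0, hq, hd1]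
                rw [ih _ (by simp at hcs; omega) _ _ _ _ _ _ (by omega : (1:Int) ≤ d - 1)]
                cases hf : fcpGo rest (d - 1) false qc with
                | none => simp [hf]
                | some p =>
                  obtain ⟨c, after⟩ := p
                  simp [hf, splitGo]
            · by_cases hcm : ch = ','
              · subst hcm
                simp [hd0, hq]
                rw [ih _ (by simp at hcs; omega) _ _ _ _ _ _ hd]
                cases hf : fcpGo rest d false qc with
                | none => simp [hf]
                | some p =>
                  obtain ⟨c, after⟩ := p
                  simp [hf, splitGo]
              · simp [hd0, hq, hop, hcl, hcm]
                rw [ih _ (by simp at hcs; omega) _ _ _ _ _ _ hd]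
                cases hf : fcpGo rest d false qc with
                | none => simp [hf]
                | some p =>
                  obtain ⟨c, after⟩ := p
                  simp [hf, splitGo, hq, hcm]

-- whole line: the machine equals A's outer loop
theorem goB_eq_outerA (ei : List Int) (h : ∀ j ∈ ei, 0 ≤ j) : ∀ (n : Nat) (s : List Char), s.length ≤ n →
    ∀ inS qc buf vals raw, goB ei s 0 inS qc buf vals raw = outerA ei s := by
  intro n
  induction n with
  | zero =>
    intro s hs inS qc buf vals raw
    have hnil : s = [] := by cases s <;> simp_all
    subst hnil
    simp [goB, outerA]
  | succ n ih =>
    intro s hs inS qc buf vals raw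
    have hsplit : s = s.takeWhile (fun c => c != '(') ++ s.dropWhile (fun c => c != '(') :=
      (List.takeWhile_append_dropWhile).symm
    have hpre : ∀ c ∈ s.takeWhile (fun c => c != '('), c ≠ '(' := by
      intro c hc
      have := List.mem_takeWhile_imp hc
      simpa using this
    conv_lhs => rw [hsplit]
    rw [goB_copy ei _ _ hpre]
    rw [outerA.eq_def]
    cases hrest : s.dropWhile (fun c => c != '(') with
    | nil => simp [goB]
    | cons ch u =>
      have hch : ch = '(' := by
        have := List.head_dropWhile_not (fun c => c != '(') (l := s)
        rw [hrest] at this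
        simpa using this
      subst hch
      have hu : u.length ≤ n := by
        have h1 := List.length_dropWhile_le (fun c => c != '(') s
        rw [hrest] at h1
        simp at h1
        omega
      have hfc : fcpGo ('(' :: u) 0 false default
          = (fcpGo u 1 false default).map (fun p => ('(' :: p.1, p.2)) := by
        rw [fcpGo.eq_def]
        simp
      conv_lhs => rw [goB]
      simp only [reduceIte]
      rw [goB_tuple ei n u hu 1 false default [] [] ['('] le_rfl]
      simp only [List.isEmpty_cons, Bool.false_eq_true, if_false]
      cases hf : fcpGo u 1 false default with
      | none =>
        rw [hf] at hfc
        simp only [Option.map_none] at hfc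
        simp only [hf]
        split
        · simp
        · next consumed after' heq =>
            rw [hfc] at heq
            exact absurd heq (by simp)
      | some p =>
        obtain ⟨c, after⟩ := p
        rw [hf] at hfc
        simp only [Option.map_some] at hfc
        have hafter : after.length ≤ n := by
          have := fcp_after_len u.length u le_rfl 1 false default c after hf
          omega
        simp only [hf]
        split
        · next heq =>
            rw [hfc] at heq
            exact absurd heq (by simp)
        · next consumed after' heq =>
          rw [hfc] at heq
          injection heq with hpair
          have h1 : '(' :: c = consumed := congrArg Prod.fst hpair
          have h2 : after = after' := congrArg Prod.snd hpair
          subst h1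
          subst h2
          rw [ih after hafter false default [] [] [], substEnum_eq ei h]
          simp

-- ===== VERDICT (by name: the statement is the Claim_ definition above) =====
theorem fix_enum_tuples_in_line_spec : Claim_equal_fix_enum_tuples_in_line := by
  intro line ei _ hpre
  unfold Spec_fix_enum_tuples_in_line fix_enum_tuples_in_line fix_enum_tuples_in_line_alt
  rw [goB_eq_outerA ei hpre line.toList.length line.toList le_rfl]
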